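-- pv_equiv track=rewrite | github.com/huzecong/gsa-ultra-2020 | two-quests.py | solution
-- ===== SOURCE A (Python) =====
-- from typing import List
--
-- INF = 2000000000
--
-- def solution(a: List[int], b: List[int]) -> int:
--     n = len(a)
--     m = len(b)
--     a = [0] + a
--     b = [0] + b
--     diff_a = [0] + [abs(y - x) for x, y in zip(a, a[1:])] + [0] * (m + 1)
--     diff_b = [0] + [abs(y - x) for x, y in zip(b, b[1:])] + [0] * (n + 1)
--     f = [INF] * (n + m + 1)
--     g = [INF] * (n + m + 1)
--     # f[i]/g[i] -> (i, diag - i)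
--     f[1], g[0] = a[1], b[1]
--     for diag in range(2, n + m + 1):
--         # if diag <= n:
--         f[diag] = f[diag - 1] + diff_a[diag]
--         l, r = max(1, diag - m), min(n, diag - 1)
--         for i in range(r, l - 1, -1):
--             j = diag - i
--             g[i] = min(f[i] + abs(b[j] - a[i]), g[i] + diff_b[j])
--             f[i] = min(f[i - 1] + diff_a[i], g[i - 1] + abs(a[i] - b[j]))
--         # if diag <= m:
--         g[0] += diff_b[diag]
--     return min(f[n], g[n])
-- ===== SOURCE B (Python) =====
-- from typing import List
--
-- INF = 2000000000
--
-- def solution(a: List[int], b: List[int]) -> int: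
--     n = len(a)
--     m = len(b)
--     a = [0] + a
--     b = [0] + b
--     diff_a = [0] + [abs(a[i] - a[i - 1]) for i in range(1, n + 1)]
--     diff_b = [0] + [abs(b[j] - b[j - 1]) for j in range(1, m + 1)]
--     # F[i][j]: min cost when hero A stands at a[i], last move was A's, j quests of B done.
--     # G[i][j]: same with hero B at b[j] moving last.
--     F = [[INF] * (m + 1) for _ in range(n + 1)]
--     G = [[INF] * (m + 1) for _ in range(n + 1)]
--     F[1][0] = a[1]
--     for i in range(2, n + 1):
--         F[i][0] = F[i - 1][0] + diff_a[i]
--     G[0][1] = b[1]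
--     for j in range(2, m + 1):
--         G[0][j] = G[0][j - 1] + diff_b[j]
--     for i in range(1, n + 1):
--         for j in range(1, m + 1):
--             G[i][j] = min(F[i][j - 1] + abs(b[j] - a[i]), G[i][j - 1] + diff_b[j])
--             F[i][j] = min(F[i - 1][j] + diff_a[i], G[i - 1][j] + abs(a[i] - b[j]))
--     return min(F[n][m], G[n][m])
-- ===== Notes on version B (the rewrite author's own statement) =====
-- stated objective: simpler
-- what changed: Replaces the anti-diagonal sweep over two rolling 1D arrays by the underlying 2D recurrences F[i][j]/G[i][j] filled in plain row-major order into two (n+1)x(m+1) tables, with explicit base row/column chains.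
import Mathlib
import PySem

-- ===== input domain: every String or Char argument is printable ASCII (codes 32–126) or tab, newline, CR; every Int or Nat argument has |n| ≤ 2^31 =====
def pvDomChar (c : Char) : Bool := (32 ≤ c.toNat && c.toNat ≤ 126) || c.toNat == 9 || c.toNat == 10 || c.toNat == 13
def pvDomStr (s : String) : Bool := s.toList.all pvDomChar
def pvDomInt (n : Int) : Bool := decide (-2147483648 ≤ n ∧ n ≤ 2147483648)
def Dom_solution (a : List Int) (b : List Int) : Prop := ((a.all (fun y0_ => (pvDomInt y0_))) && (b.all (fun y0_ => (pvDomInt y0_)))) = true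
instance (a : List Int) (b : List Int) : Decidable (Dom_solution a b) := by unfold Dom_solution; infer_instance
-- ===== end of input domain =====

-- B replaces A's anti-diagonal sweep with two rolling 1D arrays by the plain 2D
-- row-major DP tables for the same recurrences (objective: simpler).
-- Arrays are modelled as update functions Nat → Int (Python list mutation f[i]=v
-- becomes a pointwise function update); all other steps are transcribed literally.

def pvINF : Int := 2000000000

-- ===== PORT A =====
-- diff list [0] + [abs(y-x) for x,y in zip(xs, xs[1:])]
def pvDiffs (xs : List Int) : List Int :=
  0 :: (xs.zip xs.tail).map (fun p => |p.2 - p.1|)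

-- body of A's inner loop (i descending over a diagonal)
def pvInnerA (a1 b1 da db : List Int) (diag : Nat)
    (fg : (Nat → Int) × (Nat → Int)) (i : Nat) : (Nat → Int) × (Nat → Int) :=
  let j := diag - i
  let g' : Nat → Int := fun k =>
    if k = i then min (fg.1 i + |b1.getD j 0 - a1.getD i 0|) (fg.2 i + db.getD j 0) else fg.2 k
  let f' : Nat → Int := fun k =>
    if k = i then min (fg.1 (i-1) + da.getD i 0) (g' (i-1) + |a1.getD i 0 - b1.getD j 0|) else fg.1 k
  (f', g')

-- body of A's outer loop over diag
def pvStepA (n m : Nat) (a1 b1 da db : List Int)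
    (fg : (Nat → Int) × (Nat → Int)) (diag : Nat) : (Nat → Int) × (Nat → Int) :=
  let f1 : Nat → Int := fun k => if k = diag then fg.1 (diag - 1) + da.getD diag 0 else fg.1 k
  let l := max 1 (diag - m)
  let r := min n (diag - 1)
  let fg' := ((List.range' l (r + 1 - l)).reverse).foldl (pvInnerA a1 b1 da db diag) (f1, fg.2)
  (fg'.1, fun k => if k = 0 then fg'.2 0 + db.getD diag 0 else fg'.2 k)

def solution (a : List Int) (b : List Int) : Int :=
  let n := a.length
  let m := b.length
  let a1 := 0 :: a
  let b1 := 0 :: b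
  let da := pvDiffs a1 ++ List.replicate (m + 1) 0
  let db := pvDiffs b1 ++ List.replicate (n + 1) 0
  let f0 : Nat → Int := fun i => if i = 1 then a1.getD 1 0 else pvINF
  let g0 : Nat → Int := fun i => if i = 0 then b1.getD 1 0 else pvINF
  let fg := (List.range' 2 (n + m - 1)).foldl (pvStepA n m a1 b1 da db) (f0, g0)
  min (fg.1 n) (fg.2 n)

-- ===== PORT B =====
-- body of B's inner loop: fill cell (i,j) of both tables
def pvCellB (a1 b1 da db : List Int) (i : Nat)
    (FG : (Nat → Nat → Int) × (Nat → Nat → Int)) (j : Nat) :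
    (Nat → Nat → Int) × (Nat → Nat → Int) :=
  let G' : Nat → Nat → Int := fun p q =>
    if p = i ∧ q = j then
      min (FG.1 i (j-1) + |b1.getD j 0 - a1.getD i 0|) (FG.2 i (j-1) + db.getD j 0)
    else FG.2 p q
  let F' : Nat → Nat → Int := fun p q =>
    if p = i ∧ q = j then
      min (FG.1 (i-1) j + da.getD i 0) (G' (i-1) j + |a1.getD i 0 - b1.getD j 0|)
    else FG.1 p q
  (F', G')

-- body of B's outer loop: fill row i
def pvRowB (a1 b1 da db : List Int) (m : Nat)
    (FG : (Nat → Nat → Int) × (Nat → Nat → Int)) (i : Nat) :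
    (Nat → Nat → Int) × (Nat → Nat → Int) :=
  (List.range' 1 m).foldl (pvCellB a1 b1 da db i) FG

def solution_alt (a : List Int) (b : List Int) : Int :=
  let n := a.length
  let m := b.length
  let a1 := 0 :: a
  let b1 := 0 :: b
  let da := pvDiffs a1
  let db := pvDiffs b1
  let F0 : Nat → Nat → Int := fun p q => if p = 1 ∧ q = 0 then a1.getD 1 0 else pvINF
  let F1 := (List.range' 2 (n - 1)).foldl
    (fun (F : Nat → Nat → Int) i => fun p q =>
      if p = i ∧ q = 0 then F (i-1) 0 + da.getD i 0 else F p q) F0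
  let G0 : Nat → Nat → Int := fun p q => if p = 0 ∧ q = 1 then b1.getD 1 0 else pvINF
  let G1 := (List.range' 2 (m - 1)).foldl
    (fun (G : Nat → Nat → Int) j => fun p q =>
      if p = 0 ∧ q = j then G 0 (j-1) + db.getD j 0 else G p q) G0
  let FG := (List.range' 1 n).foldl (pvRowB a1 b1 da db m) (F1, G1)
  min (FG.1 n m) (FG.2 n m)

-- ===== PRECONDITION & SPEC =====
-- A reads a[1] and b[1] of the padded lists, an IndexError when a or b is empty.
def Pre_solution (a : List Int) (b : List Int) : Prop := a ≠ [] ∧ b ≠ []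
instance (a : List Int) (b : List Int) : Decidable (Pre_solution a b) := by
  unfold Pre_solution; infer_instance

def pvWitness_solution : List Int × List Int := ([1, 5], [2])

def Spec_solution (a : List Int) (b : List Int) (out : Int) : Prop := out = solution_alt a b
instance (a : List Int) (b : List Int) (out : Int) : Decidable (Spec_solution a b out) := by
  unfold Spec_solution; infer_instance

-- ===== CLAIM (what is proved, stated in full; the proofs are below) =====
def Claim_equal_solution : Prop := ∀ (a : List Int) (b : List Int),
  Dom_solution a b → Pre_solution a b → Spec_solution a b (solution a b)

-- ===== LEMMAS AND PROOFS =====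

-- padded diff value: |xs1[i]-xs1[i-1]| for 1 ≤ i ≤ len, else 0
def pvD (xs1 : List Int) (len : Nat) (i : Nat) : Int :=
  if 1 ≤ i ∧ i ≤ len then |xs1.getD i 0 - xs1.getD (i-1) 0| else 0

-- the common mathematical recurrence (what both DP computations compute)
mutual
def Ff (a1 b1 : List Int) (n m : Nat) : Nat → Nat → Int
  | 0, _ => pvINF
  | i+1, 0 => if i = 0 then a1.getD 1 0 else Ff a1 b1 n m i 0 + pvD a1 n (i+1)
  | i+1, j+1 => min (Ff a1 b1 n m i (j+1) + pvD a1 n (i+1))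
                    (Gf a1 b1 n m i (j+1) + |a1.getD (i+1) 0 - b1.getD (j+1) 0|)
termination_by i j => i + j
decreasing_by all_goals omega
def Gf (a1 b1 : List Int) (n m : Nat) : Nat → Nat → Int
  | _, 0 => pvINF
  | 0, j+1 => if j = 0 then b1.getD 1 0 else Gf a1 b1 n m 0 j + pvD b1 m (j+1)
  | i+1, j+1 => min (Ff a1 b1 n m (i+1) j + |b1.getD (j+1) 0 - a1.getD (i+1) 0|)
                    (Gf a1 b1 n m (i+1) j + pvD b1 m (j+1))
termination_by i j => i + j
decreasing_by all_goals omega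
end

theorem diffs_getD (xs : List Int) (i : Nat) :
    (pvDiffs xs).getD i 0 = pvD xs (xs.length - 1) i := by
  cases i with
  | zero => simp [pvDiffs, pvD]
  | succ i =>
    simp only [pvDiffs, List.getD_cons_succ, pvD]
    rw [List.getD_eq_getElem?_getD, List.getElem?_map, List.zip_eq_zipWith,
        List.getElem?_zipWith, List.getElem?_tail]
    by_cases h : i + 1 < xs.length
    · have h0 : i < xs.length := by omega
      rw [List.getElem?_eq_getElem h, List.getElem?_eq_getElem h0]
      rw [if_pos (by omega)]
      simp [List.getD_eq_getElem?_getD, List.getElem?_eq_getElem h,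
            List.getElem?_eq_getElem h0]
    · have hn : xs[i+1]? = none := List.getElem?_eq_none (by omega)
      rw [hn]
      rw [if_neg (by omega)]
      cases hx : xs[i]? <;> simp

theorem diffs_pad_getD (xs : List Int) (k i : Nat) :
    (pvDiffs xs ++ List.replicate k 0).getD i 0 = pvD xs (xs.length - 1) i := by
  by_cases h : i < (pvDiffs xs).length
  · rw [List.getD_append _ _ _ _ h, diffs_getD]
  · have hlen : (pvDiffs xs).length = min xs.length xs.tail.length + 1 := by
      simp [pvDiffs]
    have hl2 : xs.tail.length = xs.length - 1 := by simp
    rw [List.getD_append_right _ _ _ _ (by omega)]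
    rw [pvD, if_neg (by omega)]
    rw [List.getD_eq_getElem?_getD, List.getElem?_replicate]
    split <;> rfl

-- f-array contents after A has finished diagonal d
def AFt (a1 b1 : List Int) (n m d i : Nat) : Int :=
  if i = 0 then pvINF
  else if i ≤ d then (if i ≤ n then Ff a1 b1 n m i (min (d - i) m) else Ff a1 b1 n m i 0)
  else pvINF

-- g-array contents after A has finished diagonal d
def AGt (a1 b1 : List Int) (n m d i : Nat) : Int :=
  if i = 0 then Gf a1 b1 n m 0 d
  else if i < d ∧ i ≤ n then Gf a1 b1 n m i (min (d - i) m) else pvINF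

-- f-array contents during diagonal d+1, after the boundary write, with indices ≥ t processed
def NFt (a1 b1 : List Int) (n m d t i : Nat) : Int :=
  if max 1 (d + 1 - m) ≤ i ∧ i ≤ min n d ∧ t ≤ i then Ff a1 b1 n m i (d + 1 - i)
  else if i = d + 1 then Ff a1 b1 n m (d + 1) 0
  else AFt a1 b1 n m d i

-- g-array contents during diagonal d+1 with indices ≥ t processed
def NGt (a1 b1 : List Int) (n m d t i : Nat) : Int :=
  if max 1 (d + 1 - m) ≤ i ∧ i ≤ min n d ∧ t ≤ i then Gf a1 b1 n m i (d + 1 - i)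
  else AGt a1 b1 n m d i

theorem Ff_zero (a1 b1 : List Int) (n m j : Nat) : Ff a1 b1 n m 0 j = pvINF := by
  simp [Ff]

theorem Gf_zero (a1 b1 : List Int) (n m i : Nat) : Gf a1 b1 n m i 0 = pvINF := by
  cases i <;> simp [Gf]

theorem Ff_succ_zero (a1 b1 : List Int) (n m i : Nat) (hi : 1 ≤ i) :
    Ff a1 b1 n m (i + 1) 0 = Ff a1 b1 n m i 0 + pvD a1 n (i + 1) := by
  rw [show Ff a1 b1 n m (i+1) 0 = if i = 0 then a1.getD 1 0 else Ff a1 b1 n m i 0 + pvD a1 n (i+1) from by simp [Ff]]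
  rw [if_neg (by omega)]

theorem Gf_succ_zero (a1 b1 : List Int) (n m j : Nat) (hj : 1 ≤ j) :
    Gf a1 b1 n m 0 (j + 1) = Gf a1 b1 n m 0 j + pvD b1 m (j + 1) := by
  rw [show Gf a1 b1 n m 0 (j+1) = if j = 0 then b1.getD 1 0 else Gf a1 b1 n m 0 j + pvD b1 m (j+1) from by simp [Gf]]
  rw [if_neg (by omega)]

theorem innerA_step (a1 b1 da db : List Int) (n m d i : Nat)
    (hda : ∀ i, da.getD i 0 = pvD a1 n i) (hdb : ∀ j, db.getD j 0 = pvD b1 m j)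
    (hd : 1 ≤ d) (hli : max 1 (d + 1 - m) ≤ i) (hir : i ≤ min n d) :
    pvInnerA a1 b1 da db (d + 1)
      (fun k => NFt a1 b1 n m d (i + 1) k, fun k => NGt a1 b1 n m d (i + 1) k) i
      = (fun k => NFt a1 b1 n m d i k, fun k => NGt a1 b1 n m d i k) := by
  obtain ⟨i', rfl⟩ : ∃ i', i = i' + 1 := ⟨i - 1, by omega⟩
  obtain ⟨j', hj'⟩ : ∃ j', d + 1 - (i' + 1) = j' + 1 := ⟨d - (i' + 1), by omega⟩
  have eF_im1 : NFt a1 b1 n m d (i' + 2) i' = Ff a1 b1 n m i' (j' + 1) := by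
    rw [NFt, if_neg (by omega), if_neg (by omega), AFt]
    by_cases h0 : i' = 0
    · subst h0
      rw [if_pos rfl, Ff_zero]
    · rw [if_neg h0, if_pos (by omega), if_pos (by omega)]
      congr 1
      omega
  have eG_im1 : NGt a1 b1 n m d (i' + 2) i' = Gf a1 b1 n m i' (j' + 1) := by
    rw [NGt, if_neg (by omega), AGt]
    by_cases h0 : i' = 0
    · subst h0
      rw [if_pos rfl, show d = j' + 1 from by omega]
    · rw [if_neg h0, if_pos (by omega)]
      congr 1
      omega
  have eF_i : NFt a1 b1 n m d (i' + 2) (i' + 1) = Ff a1 b1 n m (i' + 1) j' := by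
    rw [NFt, if_neg (by omega), if_neg (by omega), AFt, if_neg (by omega),
        if_pos (by omega), if_pos (by omega)]
    congr 1
    omega
  have eG_i : NGt a1 b1 n m d (i' + 2) (i' + 1) = Gf a1 b1 n m (i' + 1) j' := by
    rw [NGt, if_neg (by omega), AGt, if_neg (by omega)]
    by_cases hlt : i' + 1 < d
    · rw [if_pos (by omega)]
      congr 1
      omega
    · rw [if_neg (by omega), show j' = 0 from by omega, Gf_zero]
  refine Prod.ext ?_ ?_ <;> simp only [pvInnerA] <;> funext k <;>
    by_cases hk : k = i' + 1
  · subst hk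
    rw [if_pos rfl]
    rw [show (i' + 1 : Nat) - 1 = i' from by omega]
    rw [if_neg (by omega), eF_im1, eG_im1, hda, hj']
    rw [NFt, if_pos (by omega)]
    rw [hj']
    rw [show Ff a1 b1 n m (i' + 1) (j' + 1)
          = min (Ff a1 b1 n m i' (j' + 1) + pvD a1 n (i' + 1))
                (Gf a1 b1 n m i' (j' + 1) + |a1.getD (i' + 1) 0 - b1.getD (j' + 1) 0|) from by
      simp [Ff]]
  · rw [if_neg hk, NFt, NFt]
    split_ifs <;> first | rfl | omega
  · subst hk
    rw [if_pos rfl]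
    rw [eF_i, eG_i, hdb, hj']
    rw [NGt, if_pos (by omega)]
    rw [hj']
    rw [show Gf a1 b1 n m (i' + 1) (j' + 1)
          = min (Ff a1 b1 n m (i' + 1) j' + |b1.getD (j' + 1) 0 - a1.getD (i' + 1) 0|)
                (Gf a1 b1 n m (i' + 1) j' + pvD b1 m (j' + 1)) from by
      simp [Gf]]
  · rw [if_neg hk, NGt, NGt]
    split_ifs <;> first | rfl | omega

theorem innerA_fold (a1 b1 da db : List Int) (n m d : Nat)
    (hda : ∀ i, da.getD i 0 = pvD a1 n i) (hdb : ∀ j, db.getD j 0 = pvD b1 m j)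
    (hd : 1 ≤ d) :
    ∀ c, max 1 (d + 1 - m) + c ≤ min n d + 1 →
    ((List.range' (max 1 (d + 1 - m)) c).reverse).foldl (pvInnerA a1 b1 da db (d + 1))
      (fun k => NFt a1 b1 n m d (max 1 (d + 1 - m) + c) k,
       fun k => NGt a1 b1 n m d (max 1 (d + 1 - m) + c) k)
      = (fun k => NFt a1 b1 n m d (max 1 (d + 1 - m)) k,
         fun k => NGt a1 b1 n m d (max 1 (d + 1 - m)) k) := by
  intro c
  induction c with
  | zero => intro _; simp
  | succ c ih =>
    intro hc
    have hr : List.range' (max 1 (d + 1 - m)) (c + 1)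
        = List.range' (max 1 (d + 1 - m)) c ++ [max 1 (d + 1 - m) + c] := by
      simpa using List.range'_concat (step := 1) (s := max 1 (d + 1 - m)) (n := c)
    rw [hr, List.reverse_append, List.reverse_singleton, List.singleton_append,
        List.foldl_cons]
    have hstep := innerA_step a1 b1 da db n m d (max 1 (d + 1 - m) + c) hda hdb hd
      (by omega) (by omega)
    rw [show max 1 (d + 1 - m) + (c + 1) = (max 1 (d + 1 - m) + c) + 1 from rfl, hstep,
        ih (by omega)]

theorem stepA (a1 b1 da db : List Int) (n m d : Nat)
    (hda : ∀ i, da.getD i 0 = pvD a1 n i) (hdb : ∀ j, db.getD j 0 = pvD b1 m j)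
    (hn : 1 ≤ n) (hm : 1 ≤ m) (hd : 1 ≤ d) (hd2 : d + 1 ≤ n + m) :
    pvStepA n m a1 b1 da db
      (fun k => AFt a1 b1 n m d k, fun k => AGt a1 b1 n m d k) (d + 1)
      = (fun k => AFt a1 b1 n m (d + 1) k, fun k => AGt a1 b1 n m (d + 1) k) := by
  have hd1 : (d + 1) - 1 = d := by omega
  have hAdd : AFt a1 b1 n m d d = Ff a1 b1 n m d 0 := by
    rw [AFt, if_neg (by omega), if_pos le_rfl]
    split_ifs
    · congr 1
      omega
    · rfl
  simp only [pvStepA, hd1]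
  have hstart : (fun k => if k = d + 1 then AFt a1 b1 n m d d + da.getD (d + 1) 0
                  else AFt a1 b1 n m d k)
      = fun k => NFt a1 b1 n m d (min n d + 1) k := by
    funext k
    by_cases hk : k = d + 1
    · subst hk
      rw [if_pos rfl, NFt, if_neg (by omega), if_pos rfl, hda, hAdd,
          Ff_succ_zero a1 b1 n m d hd]
    · rw [if_neg hk, NFt, if_neg (by omega), if_neg hk]
  have hstart2 : (fun k => AGt a1 b1 n m d k) = fun k => NGt a1 b1 n m d (min n d + 1) k := by
    funext k
    rw [NGt, if_neg (by omega)]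
  rw [hstart, hstart2]
  have hfold := innerA_fold a1 b1 da db n m d hda hdb hd (min n d + 1 - max 1 (d + 1 - m))
    (by omega)
  rw [show max 1 (d + 1 - m) + (min n d + 1 - max 1 (d + 1 - m)) = min n d + 1 from by omega]
    at hfold
  rw [hfold]
  refine Prod.ext ?_ ?_ <;> dsimp only
  · funext k
    by_cases h1 : max 1 (d + 1 - m) ≤ k ∧ k ≤ min n d ∧ max 1 (d + 1 - m) ≤ k
    · rw [NFt, if_pos h1, AFt, if_neg (by omega), if_pos (by omega), if_pos (by omega)]
      congr 1
      omega
    · by_cases h2 : k = d + 1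
      · subst h2
        rw [NFt, if_neg (by omega), if_pos rfl, AFt, if_neg (by omega), if_pos (by omega)]
        split_ifs
        · congr 1
          omega
        · rfl
      · rw [NFt, if_neg h1, if_neg h2, AFt, AFt]
        split_ifs <;> first | rfl | omega | (congr 1; omega)
  · funext k
    by_cases hk0 : k = 0
    · subst hk0
      have e1 : AGt a1 b1 n m d 0 = Gf a1 b1 n m 0 d := by rw [AGt, if_pos rfl]
      have e2 : AGt a1 b1 n m (d + 1) 0 = Gf a1 b1 n m 0 (d + 1) := by rw [AGt, if_pos rfl]
      rw [if_pos rfl, NGt, if_neg (by omega), e1, e2, hdb,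
          Gf_succ_zero a1 b1 n m d hd]
    · rw [if_neg hk0, NGt]
      by_cases h1 : max 1 (d + 1 - m) ≤ k ∧ k ≤ min n d ∧ max 1 (d + 1 - m) ≤ k
      · rw [if_pos h1, AGt, if_neg hk0, if_pos (by omega)]
        congr 1
        omega
      · rw [if_neg h1, AGt, AGt]
        split_ifs <;> first | rfl | omega | (congr 1; omega)

theorem foldA (a1 b1 da db : List Int) (n m : Nat)
    (hda : ∀ i, da.getD i 0 = pvD a1 n i) (hdb : ∀ j, db.getD j 0 = pvD b1 m j)
    (hn : 1 ≤ n) (hm : 1 ≤ m) :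
    ∀ e, e + 1 ≤ n + m →
    (List.range' 2 e).foldl (pvStepA n m a1 b1 da db)
      (fun k => AFt a1 b1 n m 1 k, fun k => AGt a1 b1 n m 1 k)
      = (fun k => AFt a1 b1 n m (e + 1) k, fun k => AGt a1 b1 n m (e + 1) k) := by
  intro e
  induction e with
  | zero => intro _; rfl
  | succ e ih =>
    intro he
    have : List.range' 2 (e + 1) = List.range' 2 e ++ [2 + e] := by
      simpa using List.range'_concat (step := 1) (s := 2) (n := e)
    rw [this, List.foldl_append, ih (by omega), List.foldl_cons, List.foldl_nil]
    have h2 : 2 + e = (e + 1) + 1 := by omega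
    rw [h2, stepA a1 b1 da db n m (e + 1) hda hdb hn hm (by omega) (by omega)]

-- B-side table contents: rows < i and, in row i, columns < j are filled
def MFt (a1 b1 : List Int) (n m i j p q : Nat) : Int :=
  if 1 ≤ q ∧ q ≤ m ∧ 1 ≤ p ∧ (p < i ∨ (p = i ∧ q < j)) then Ff a1 b1 n m p q
  else if q = 0 ∧ 1 ≤ p ∧ p ≤ n then Ff a1 b1 n m p 0
  else pvINF

def MGt (a1 b1 : List Int) (n m i j p q : Nat) : Int :=
  if 1 ≤ q ∧ q ≤ m ∧ 1 ≤ p ∧ (p < i ∨ (p = i ∧ q < j)) then Gf a1 b1 n m p q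
  else if p = 0 ∧ 1 ≤ q ∧ q ≤ m then Gf a1 b1 n m 0 q
  else pvINF

theorem cellB_step (a1 b1 da db : List Int) (n m i j : Nat)
    (hda : ∀ i, da.getD i 0 = pvD a1 n i) (hdb : ∀ j, db.getD j 0 = pvD b1 m j)
    (hi : 1 ≤ i) (hin : i ≤ n) (hj : 1 ≤ j) (hjm : j ≤ m) :
    pvCellB a1 b1 da db i
      (fun p q => MFt a1 b1 n m i j p q, fun p q => MGt a1 b1 n m i j p q) j
      = (fun p q => MFt a1 b1 n m i (j + 1) p q, fun p q => MGt a1 b1 n m i (j + 1) p q) := by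
  obtain ⟨i', rfl⟩ : ∃ i', i = i' + 1 := ⟨i - 1, by omega⟩
  obtain ⟨j', rfl⟩ : ∃ j', j = j' + 1 := ⟨j - 1, by omega⟩
  have eF_prev : MFt a1 b1 n m (i'+1) (j'+1) (i'+1) j' = Ff a1 b1 n m (i'+1) j' := by
    rw [MFt]
    by_cases h0 : j' = 0
    · subst h0
      rw [if_neg (by omega), if_pos (by omega)]
    · rw [if_pos (by omega)]
  have eG_prev : MGt a1 b1 n m (i'+1) (j'+1) (i'+1) j' = Gf a1 b1 n m (i'+1) j' := by
    rw [MGt]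
    by_cases h0 : j' = 0
    · subst h0
      rw [if_neg (by omega), if_neg (by omega), Gf_zero]
    · rw [if_pos (by omega)]
  have eF_up : MFt a1 b1 n m (i'+1) (j'+1) i' (j'+1) = Ff a1 b1 n m i' (j'+1) := by
    rw [MFt]
    by_cases h0 : i' = 0
    · subst h0
      rw [if_neg (by omega), if_neg (by omega), Ff_zero]
    · rw [if_pos (by omega)]
  have eG_up : MGt a1 b1 n m (i'+1) (j'+1) i' (j'+1) = Gf a1 b1 n m i' (j'+1) := by
    rw [MGt]
    by_cases h0 : i' = 0
    · subst h0
      rw [if_neg (by omega), if_pos (by omega)]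
    · rw [if_pos (by omega)]
  refine Prod.ext ?_ ?_ <;> simp only [pvCellB] <;> funext p q <;>
    by_cases hk : p = i' + 1 ∧ q = j' + 1
  · obtain ⟨rfl, rfl⟩ := hk
    rw [if_pos ⟨rfl, rfl⟩]
    rw [show (i' + 1 : Nat) - 1 = i' from by omega, show (j' + 1 : Nat) - 1 = j' from by omega]
    rw [if_neg (by omega), eF_up, eG_up, hda]
    rw [MFt, if_pos (by omega)]
    rw [show Ff a1 b1 n m (i'+1) (j'+1)
          = min (Ff a1 b1 n m i' (j'+1) + pvD a1 n (i'+1))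
                (Gf a1 b1 n m i' (j'+1) + |a1.getD (i'+1) 0 - b1.getD (j'+1) 0|) from by
      simp [Ff]]
  · rw [if_neg hk, MFt, MFt]
    split_ifs <;> first | rfl | omega
  · obtain ⟨rfl, rfl⟩ := hk
    rw [if_pos ⟨rfl, rfl⟩]
    rw [show (j' + 1 : Nat) - 1 = j' from by omega]
    rw [eF_prev, eG_prev, hdb]
    rw [MGt, if_pos (by omega)]
    rw [show Gf a1 b1 n m (i'+1) (j'+1)
          = min (Ff a1 b1 n m (i'+1) j' + |b1.getD (j'+1) 0 - a1.getD (i'+1) 0|)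
                (Gf a1 b1 n m (i'+1) j' + pvD b1 m (j'+1)) from by
      simp [Gf]]
  · rw [if_neg hk, MGt, MGt]
    split_ifs <;> first | rfl | omega

theorem rowB_fold (a1 b1 da db : List Int) (n m i : Nat)
    (hda : ∀ i, da.getD i 0 = pvD a1 n i) (hdb : ∀ j, db.getD j 0 = pvD b1 m j)
    (hi : 1 ≤ i) (hin : i ≤ n) :
    ∀ c, c ≤ m →
    (List.range' 1 c).foldl (pvCellB a1 b1 da db i)
      (fun p q => MFt a1 b1 n m i 1 p q, fun p q => MGt a1 b1 n m i 1 p q)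
      = (fun p q => MFt a1 b1 n m i (c + 1) p q, fun p q => MGt a1 b1 n m i (c + 1) p q) := by
  intro c
  induction c with
  | zero => intro _; rfl
  | succ c ih =>
    intro hc
    have : List.range' 1 (c + 1) = List.range' 1 c ++ [1 + c] := by
      simpa using List.range'_concat (step := 1) (s := 1) (n := c)
    rw [this, List.foldl_append, ih (by omega), List.foldl_cons, List.foldl_nil]
    have h1 : 1 + c = c + 1 := by omega
    rw [h1, cellB_step a1 b1 da db n m i (c + 1) hda hdb hi hin (by omega) (by omega)]

theorem rowB_shift (a1 b1 : List Int) (n m i : Nat) :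
    (fun p q => MFt a1 b1 n m i (m + 1) p q, fun p q => MGt a1 b1 n m i (m + 1) p q)
      = (fun p q => MFt a1 b1 n m (i + 1) 1 p q, fun p q => MGt a1 b1 n m (i + 1) 1 p q) := by
  refine Prod.ext ?_ ?_ <;> · funext p q
                              simp only [MFt, MGt]
                              split_ifs <;> first | rfl | omega

theorem outerB_fold (a1 b1 da db : List Int) (n m : Nat)
    (hda : ∀ i, da.getD i 0 = pvD a1 n i) (hdb : ∀ j, db.getD j 0 = pvD b1 m j) :
    ∀ c, c ≤ n →
    (List.range' 1 c).foldl (pvRowB a1 b1 da db m)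
      (fun p q => MFt a1 b1 n m 1 1 p q, fun p q => MGt a1 b1 n m 1 1 p q)
      = (fun p q => MFt a1 b1 n m (c + 1) 1 p q, fun p q => MGt a1 b1 n m (c + 1) 1 p q) := by
  intro c
  induction c with
  | zero => intro _; rfl
  | succ c ih =>
    intro hc
    have : List.range' 1 (c + 1) = List.range' 1 c ++ [1 + c] := by
      simpa using List.range'_concat (step := 1) (s := 1) (n := c)
    rw [this, List.foldl_append, ih (by omega), List.foldl_cons, List.foldl_nil]
    have h1 : 1 + c = c + 1 := by omega
    rw [h1]
    show pvRowB a1 b1 da db m _ (c+1) = _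
    rw [pvRowB, rowB_fold a1 b1 da db n m (c + 1) hda hdb (by omega) (by omega) m le_rfl,
        rowB_shift]

theorem colF_fold (a1 b1 da : List Int) (n m : Nat)
    (hda : ∀ i, da.getD i 0 = pvD a1 n i) :
    ∀ c, (List.range' 2 c).foldl
      (fun (F : Nat → Nat → Int) i => fun p q =>
        if p = i ∧ q = 0 then F (i-1) 0 + da.getD i 0 else F p q)
      (fun p q => if p = 1 ∧ q = 0 then a1.getD 1 0 else pvINF)
      = fun p q => if q = 0 ∧ 1 ≤ p ∧ p ≤ c + 1 then Ff a1 b1 n m p 0 else pvINF := by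
  intro c
  induction c with
  | zero =>
    rw [List.range'_zero, List.foldl_nil]
    funext p q
    by_cases h : p = 1 ∧ q = 0
    · obtain ⟨rfl, rfl⟩ := h
      rw [if_pos ⟨rfl, rfl⟩, if_pos (by omega)]
      simp [Ff]
    · rw [if_neg h, if_neg (by omega)]
  | succ c ih =>
    have hr : List.range' 2 (c + 1) = List.range' 2 c ++ [2 + c] := by
      simpa using List.range'_concat (step := 1) (s := 2) (n := c)
    rw [hr, List.foldl_append, ih, List.foldl_cons, List.foldl_nil]
    beta_reduce
    funext p q
    by_cases h : p = 2 + c ∧ q = 0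
    · obtain ⟨rfl, rfl⟩ := h
      rw [if_pos ⟨rfl, rfl⟩, if_pos (by omega), hda]
      have h2 : 2 + c = (c + 1) + 1 := by omega
      rw [h2]
      rw [show (c + 1 + 1 : Nat) - 1 = c + 1 from by omega]
      have := Ff_succ_zero a1 b1 n m (c + 1) (by omega)
      rw [this, if_pos (by omega)]
    · rw [if_neg h]
      by_cases h2 : q = 0 ∧ 1 ≤ p ∧ p ≤ c + 1
      · rw [if_pos h2, if_pos (by omega)]
      · rw [if_neg h2, if_neg (by omega)]

theorem colG_fold (a1 b1 db : List Int) (n m : Nat)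
    (hdb : ∀ j, db.getD j 0 = pvD b1 m j) :
    ∀ c, (List.range' 2 c).foldl
      (fun (G : Nat → Nat → Int) j => fun p q =>
        if p = 0 ∧ q = j then G 0 (j-1) + db.getD j 0 else G p q)
      (fun p q => if p = 0 ∧ q = 1 then b1.getD 1 0 else pvINF)
      = fun p q => if p = 0 ∧ 1 ≤ q ∧ q ≤ c + 1 then Gf a1 b1 n m 0 q else pvINF := by
  intro c
  induction c with
  | zero =>
    rw [List.range'_zero, List.foldl_nil]
    funext p q
    by_cases h : p = 0 ∧ q = 1
    · obtain ⟨rfl, rfl⟩ := h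
      rw [if_pos ⟨rfl, rfl⟩, if_pos (by omega)]
      simp [Gf]
    · rw [if_neg h, if_neg (by omega)]
  | succ c ih =>
    have hr : List.range' 2 (c + 1) = List.range' 2 c ++ [2 + c] := by
      simpa using List.range'_concat (step := 1) (s := 2) (n := c)
    rw [hr, List.foldl_append, ih, List.foldl_cons, List.foldl_nil]
    beta_reduce
    funext p q
    by_cases h : p = 0 ∧ q = 2 + c
    · obtain ⟨rfl, rfl⟩ := h
      rw [if_pos ⟨rfl, rfl⟩, if_pos (by omega), hdb]
      have h2 : 2 + c = (c + 1) + 1 := by omega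
      rw [h2]
      rw [show (c + 1 + 1 : Nat) - 1 = c + 1 from by omega]
      have := Gf_succ_zero a1 b1 n m (c + 1) (by omega)
      rw [this, if_pos (by omega)]
    · rw [if_neg h]
      by_cases h2 : p = 0 ∧ 1 ≤ q ∧ q ≤ c + 1
      · rw [if_pos h2, if_pos (by omega)]
      · rw [if_neg h2, if_neg (by omega)]

-- ===== VERDICT (by name: the statement is the Claim_ definition above) =====
theorem solution_spec : Claim_equal_solution := by
  intro a b _ hpre
  obtain ⟨ha, hb⟩ := hpre
  have hn : 1 ≤ a.length := List.length_pos_iff.mpr ha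
  have hm : 1 ≤ b.length := List.length_pos_iff.mpr hb
  show solution a b = solution_alt a b
  have hda : ∀ i, (pvDiffs (0 :: a) ++ List.replicate (b.length + 1) 0).getD i 0
      = pvD (0 :: a) a.length i := by
    intro i
    rw [diffs_pad_getD]
    simp
  have hdb : ∀ j, (pvDiffs (0 :: b) ++ List.replicate (a.length + 1) 0).getD j 0
      = pvD (0 :: b) b.length j := by
    intro j
    rw [diffs_pad_getD]
    simp
  have hda' : ∀ i, (pvDiffs (0 :: a)).getD i 0 = pvD (0 :: a) a.length i := by
    intro i
    rw [diffs_getD]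
    simp
  have hdb' : ∀ j, (pvDiffs (0 :: b)).getD j 0 = pvD (0 :: b) b.length j := by
    intro j
    rw [diffs_getD]
    simp
  -- A side
  have hinitF : (fun i => if i = 1 then (0 :: a).getD 1 0 else pvINF)
      = fun k => AFt (0 :: a) (0 :: b) a.length b.length 1 k := by
    funext i
    by_cases h1 : i = 1
    · subst h1
      rw [if_pos rfl, AFt, if_neg (by omega), if_pos le_rfl, if_pos hn,
          show min (1 - 1) b.length = 0 from by omega]
      simp [Ff]
    · rw [if_neg h1, AFt]
      split_ifs <;> first | rfl | omega
  have hinitG : (fun i => if i = 0 then (0 :: b).getD 1 0 else pvINF)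
      = fun k => AGt (0 :: a) (0 :: b) a.length b.length 1 k := by
    funext i
    by_cases h0 : i = 0
    · subst h0
      rw [if_pos rfl, AGt, if_pos rfl]
      simp [Gf]
    · rw [if_neg h0, AGt, if_neg h0, if_neg (by omega)]
  have hA : solution a b
      = min (Ff (0 :: a) (0 :: b) a.length b.length a.length b.length)
            (Gf (0 :: a) (0 :: b) a.length b.length a.length b.length) := by
    simp only [solution]
    rw [hinitF, hinitG,
        foldA (0 :: a) (0 :: b) _ _ a.length b.length hda hdb hn hm
          (a.length + b.length - 1) (by omega),
        show a.length + b.length - 1 + 1 = a.length + b.length from by omega]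
    dsimp only
    rw [AFt, if_neg (by omega), if_pos (by omega), if_pos le_rfl,
        show min (a.length + b.length - a.length) b.length = b.length from by omega,
        AGt, if_neg (by omega), if_pos (by omega),
        show min (a.length + b.length - a.length) b.length = b.length from by omega]
  -- B side
  have hcol : ((fun p q => if q = 0 ∧ 1 ≤ p ∧ p ≤ (a.length - 1) + 1
                  then Ff (0 :: a) (0 :: b) a.length b.length p 0 else pvINF :
                  Nat → Nat → Int),
               (fun p q => if p = 0 ∧ 1 ≤ q ∧ q ≤ (b.length - 1) + 1
                  then Gf (0 :: a) (0 :: b) a.length b.length 0 q else pvINF :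
                  Nat → Nat → Int))
      = ((fun p q => MFt (0 :: a) (0 :: b) a.length b.length 1 1 p q),
         (fun p q => MGt (0 :: a) (0 :: b) a.length b.length 1 1 p q)) := by
    refine Prod.ext ?_ ?_ <;> dsimp only <;> funext p q
    · rw [MFt]
      split_ifs <;> first | rfl | omega
    · rw [MGt]
      split_ifs <;> first | rfl | omega
  have hB : solution_alt a b
      = min (Ff (0 :: a) (0 :: b) a.length b.length a.length b.length)
            (Gf (0 :: a) (0 :: b) a.length b.length a.length b.length) := by
    simp only [solution_alt]
    rw [colF_fold (0 :: a) (0 :: b) (pvDiffs (0 :: a)) a.length b.length hda' (a.length - 1),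
        colG_fold (0 :: a) (0 :: b) (pvDiffs (0 :: b)) a.length b.length hdb' (b.length - 1)]
    rw [show ((fun p q => if q = 0 ∧ 1 ≤ p ∧ p ≤ (a.length - 1) + 1
          then Ff (0 :: a) (0 :: b) a.length b.length p 0 else pvINF : Nat → Nat → Int),
        (fun p q => if p = 0 ∧ 1 ≤ q ∧ q ≤ (b.length - 1) + 1
          then Gf (0 :: a) (0 :: b) a.length b.length 0 q else pvINF : Nat → Nat → Int))
        = ((fun p q => MFt (0 :: a) (0 :: b) a.length b.length 1 1 p q),
           (fun p q => MGt (0 :: a) (0 :: b) a.length b.length 1 1 p q)) from hcol]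
    rw [outerB_fold (0 :: a) (0 :: b) _ _ a.length b.length hda' hdb' a.length le_rfl]
    dsimp only
    rw [MFt, if_pos (by omega), MGt, if_pos (by omega)]
  rw [hA, hB]
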